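-- pv_equiv track=rewrite | github.com/duttosourav8/Optimized-Tirgn | src/history_validity_calibration.py | build_ro_history
-- ===== SOURCE A (Python) =====
-- from collections import defaultdict
-- from typing import Dict, List, Tuple
-- from collections import defaultdict
-- from typing import Dict, List, Tuple
--
-- Triple = Tuple[int, int, int, int]
--
-- def build_ro_history(triples: List[Triple]):
--     ro_hist = defaultdict(lambda: defaultdict(list))
--     for s, r, o, t in triples:
--         ro_hist[r][o].append(t)
--     for r in ro_hist:
--         for o in ro_hist[r]:
--             ro_hist[r][o].sort()
--     return ro_hist
-- ===== SOURCE B (Python) =====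
-- def build_ro_history(triples):
--     # One pass: keep each (r, o) bucket sorted by inserting every timestamp at
--     # its sorted position, so no per-bucket sort phase is needed at the end.
--     ro_hist = {}
--     for s, r, o, t in triples:
--         bucket = ro_hist.setdefault(r, {}).setdefault(o, [])
--         i = 0
--         while i < len(bucket) and bucket[i] <= t:
--             i += 1
--         bucket.insert(i, t)
--     return ro_hist
-- ===== Notes on version B (the rewrite author's own statement) =====
-- stated objective: alternative
-- what changed: Replaces A's group-then-sort-each-bucket two-phase structure with a single grouping pass that keeps every (r,o) bucket sorted by inserting each timestamp at its sorted position, eliminating the final nested sorting loops.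
import Mathlib
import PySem

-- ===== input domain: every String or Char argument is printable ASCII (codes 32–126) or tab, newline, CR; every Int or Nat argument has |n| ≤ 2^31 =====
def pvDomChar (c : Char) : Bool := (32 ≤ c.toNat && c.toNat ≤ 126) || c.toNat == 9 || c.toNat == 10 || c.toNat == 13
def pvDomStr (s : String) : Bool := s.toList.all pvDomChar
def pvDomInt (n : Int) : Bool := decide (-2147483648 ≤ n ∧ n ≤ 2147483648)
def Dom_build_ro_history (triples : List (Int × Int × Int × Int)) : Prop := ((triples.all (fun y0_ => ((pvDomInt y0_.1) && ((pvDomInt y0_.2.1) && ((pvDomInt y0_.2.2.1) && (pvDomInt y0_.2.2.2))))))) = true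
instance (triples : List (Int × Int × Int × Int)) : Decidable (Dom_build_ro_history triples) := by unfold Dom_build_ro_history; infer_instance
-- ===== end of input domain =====

-- B replaces A's group-then-sort-each-bucket two-phase structure with a single grouping
-- pass that keeps every (r,o) bucket sorted by inserting each timestamp at its sorted
-- position (objective: alternative decomposition, same return value).

-- ===== PORT A =====
-- A groups all timestamps per (r,o) into nested dicts, then sorts every bucket in a
-- second nested loop over the keys.
def build_ro_history (triples : List (Int × Int × Int × Int)) : List (Int × List (Int × List Int)) :=
  let ro := triples.foldl
    (fun d p =>
      d.insert p.2.1 ((d.getD p.2.1 PySem.Dict.empty).insert p.2.2.1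
        (((d.getD p.2.1 PySem.Dict.empty).getD p.2.2.1 []) ++ [p.2.2.2])))
    PySem.Dict.empty
  let ro2 := ro.keys.foldl
    (fun d r =>
      ((d.getD r PySem.Dict.empty).keys).foldl
        (fun d2 o =>
          d2.modify r PySem.Dict.empty
            (fun inner => inner.modify o [] (fun l => PySem.List.sorted l (fun x => x) false)))
        d)
    ro
  ro2.items.map (fun q => (q.1, q.2.items))

-- ===== PORT B =====
-- forward scan for the insertion position: 'i = 0; while i < len(bucket) and bucket[i] <= t: i += 1; bucket.insert(i, t)'
def insortFwd (bucket : List Int) (t : Int) : List Int :=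
  match bucket with
  | [] => [t]
  | x :: xs => if x ≤ t then x :: insortFwd xs t else t :: x :: xs

def build_ro_history_alt (triples : List (Int × Int × Int × Int)) : List (Int × List (Int × List Int)) :=
  let ro := triples.foldl
    (fun d p =>
      d.insert p.2.1 ((d.getD p.2.1 PySem.Dict.empty).insert p.2.2.1
        (insortFwd ((d.getD p.2.1 PySem.Dict.empty).getD p.2.2.1 []) p.2.2.2)))
    PySem.Dict.empty
  ro.items.map (fun q => (q.1, q.2.items))

-- ===== PRECONDITION & SPEC =====
def Spec_build_ro_history (triples : List (Int × Int × Int × Int)) (out : List (Int × List (Int × List Int))) : Prop := out = build_ro_history_alt triples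
instance (triples : List (Int × Int × Int × Int)) (out : List (Int × List (Int × List Int))) : Decidable (Spec_build_ro_history triples out) := by unfold Spec_build_ro_history; infer_instance

-- ===== CLAIM (what is proved, stated in full; the proofs are below) =====
def Claim_equal_build_ro_history : Prop := ∀ (triples : List (Int × Int × Int × Int)), Dom_build_ro_history triples → Spec_build_ro_history triples (build_ro_history triples)

-- ===== LEMMAS AND PROOFS =====

-- sorting every bucket, as a value map over the nested dict items
def mapInner (d : PySem.Dict Int (List Int)) : PySem.Dict Int (List Int) :=
  PySem.Dict.mk (d.items.map (fun p => (p.1, PySem.List.sorted p.2 (fun x => x) false)))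

def mapOuter (d : PySem.Dict Int (PySem.Dict Int (List Int))) : PySem.Dict Int (PySem.Dict Int (List Int)) :=
  PySem.Dict.mk (d.items.map (fun p => (p.1, mapInner p.2)))

-- value-mapping commutes with dict primitives
theorem mapval_get? {κ ν ν' : Type} [BEq κ] (f : ν → ν') (d : PySem.Dict κ ν) (k : κ) :
    (PySem.Dict.mk (d.items.map (fun p => (p.1, f p.2)))).get? k = (d.get? k).map f := by
  simp [PySem.Dict.get?, List.find?_map, Function.comp_def]

theorem mapval_contains {κ ν ν' : Type} [BEq κ] (f : ν → ν') (d : PySem.Dict κ ν) (k : κ) :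
    (PySem.Dict.mk (d.items.map (fun p => (p.1, f p.2)))).contains k = d.contains k := by
  simp [PySem.Dict.contains, List.any_map, Function.comp_def]

theorem mapval_insert {κ ν ν' : Type} [BEq κ] (f : ν → ν') (d : PySem.Dict κ ν) (k : κ) (v : ν) :
    PySem.Dict.mk (((d.insert k v).items).map (fun p => (p.1, f p.2)))
      = (PySem.Dict.mk (d.items.map (fun p => (p.1, f p.2)))).insert k (f v) := by
  simp only [PySem.Dict.insert, mapval_contains]
  by_cases h : d.contains k = true
  · simp only [h, if_true, List.map_map]
    congr 1
    apply List.map_congr_left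
    intro p _
    by_cases hk : (p.1 == k) = true <;> simp [hk]
  · simp [h]

theorem mapval_getD {κ ν ν' : Type} [BEq κ] (f : ν → ν') (d : PySem.Dict κ ν) (k : κ)
    (dflt : ν) (dflt' : ν') (hd : f dflt = dflt') :
    (PySem.Dict.mk (d.items.map (fun p => (p.1, f p.2)))).getD k dflt' = f (d.getD k dflt) := by
  simp only [PySem.Dict.getD, mapval_get?]
  cases d.get? k <;> simp [hd]

theorem keys_mapInner (d : PySem.Dict Int (List Int)) : (mapInner d).keys = d.keys := by
  simp [mapInner, PySem.Dict.keys, List.map_map, Function.comp_def]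

-- insortFwd inserts into a sorted list what sorting the appended list produces
theorem insortFwd_perm (l : List Int) (t : Int) : (insortFwd l t).Perm (l ++ [t]) := by
  induction l with
  | nil => simp [insortFwd]
  | cons x xs ih =>
    simp only [insortFwd]
    split
    · exact (ih.cons x).trans (by simp)
    · exact (List.perm_append_singleton t (x :: xs)).symm

theorem insortFwd_pairwise (l : List Int) (t : Int) (h : l.Pairwise (· ≤ ·)) :
    (insortFwd l t).Pairwise (· ≤ ·) := by
  induction l with
  | nil => simp [insortFwd]
  | cons x xs ih =>
    rcases List.pairwise_cons.mp h with ⟨hx, hxs⟩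
    simp only [insortFwd]
    split
    · rename_i hxt
      refine List.pairwise_cons.mpr ⟨?_, ih hxs⟩
      intro y hy
      have := (insortFwd_perm xs t).mem_iff.mp hy
      rcases List.mem_append.mp this with h1 | h2
      · exact hx y h1
      · simp at h2; omega
    · rename_i hxt
      refine List.pairwise_cons.mpr ⟨?_, h⟩
      intro y hy
      rcases List.mem_cons.mp hy with rfl | h2
      · omega
      · have := hx y h2; omega

theorem insortFwd_sorted (l : List Int) (t : Int) :
    insortFwd (PySem.List.sorted l (fun x => x) false) t
      = PySem.List.sorted (l ++ [t]) (fun x => x) false := by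
  have h1 : (insortFwd (PySem.List.sorted l (fun x => x) false) t).Perm (l ++ [t]) :=
    (insortFwd_perm _ t).trans ((PySem.List.sorted_perm l (fun x => x) false).append (List.Perm.refl [t]))
  have h2 : (insortFwd (PySem.List.sorted l (fun x => x) false) t).Pairwise (· ≤ ·) :=
    insortFwd_pairwise _ t (by simpa using PySem.List.sorted_pairwise l (fun x => x))
  exact (PySem.List.sorted_id_eq_of_perm_of_pairwise _ _ h1 h2).symm

-- phase-1 invariant: B's grouping fold tracks A's with every bucket sorted
theorem phase1_inv (xs : List (Int × Int × Int × Int)) (d : PySem.Dict Int (PySem.Dict Int (List Int))) :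
    xs.foldl
      (fun d p =>
        d.insert p.2.1 ((d.getD p.2.1 PySem.Dict.empty).insert p.2.2.1
          (insortFwd ((d.getD p.2.1 PySem.Dict.empty).getD p.2.2.1 []) p.2.2.2)))
      (mapOuter d)
    = mapOuter (xs.foldl
        (fun d p =>
          d.insert p.2.1 ((d.getD p.2.1 PySem.Dict.empty).insert p.2.2.1
            (((d.getD p.2.1 PySem.Dict.empty).getD p.2.2.1 []) ++ [p.2.2.2])))
        d) := by
  induction xs generalizing d with
  | nil => rfl
  | cons q xs ih =>
    simp only [List.foldl_cons]
    have hstep :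
        (mapOuter d).insert q.2.1 (((mapOuter d).getD q.2.1 PySem.Dict.empty).insert q.2.2.1
            (insortFwd (((mapOuter d).getD q.2.1 PySem.Dict.empty).getD q.2.2.1 []) q.2.2.2))
          = mapOuter (d.insert q.2.1 ((d.getD q.2.1 PySem.Dict.empty).insert q.2.2.1
              (((d.getD q.2.1 PySem.Dict.empty).getD q.2.2.1 []) ++ [q.2.2.2]))) := by
      have h1 : (mapOuter d).getD q.2.1 PySem.Dict.empty
          = mapInner (d.getD q.2.1 PySem.Dict.empty) := by
        simp only [mapOuter]
        exact mapval_getD mapInner d q.2.1 PySem.Dict.empty PySem.Dict.empty rfl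
      have h2 : (mapInner (d.getD q.2.1 PySem.Dict.empty)).getD q.2.2.1 []
          = PySem.List.sorted ((d.getD q.2.1 PySem.Dict.empty).getD q.2.2.1 []) (fun x => x) false := by
        simp only [mapInner]
        exact mapval_getD (fun l => PySem.List.sorted l (fun x => x) false) _ q.2.2.1 [] [] rfl
      rw [h1, h2, insortFwd_sorted]
      have h3 : (mapInner (d.getD q.2.1 PySem.Dict.empty)).insert q.2.2.1
            (PySem.List.sorted (((d.getD q.2.1 PySem.Dict.empty).getD q.2.2.1 []) ++ [q.2.2.2]) (fun x => x) false)
          = mapInner ((d.getD q.2.1 PySem.Dict.empty).insert q.2.2.1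
              (((d.getD q.2.1 PySem.Dict.empty).getD q.2.2.1 []) ++ [q.2.2.2])) := by
        simp only [mapInner]
        exact (mapval_insert (fun l => PySem.List.sorted l (fun x => x) false) _ q.2.2.1 _).symm
      rw [h3]
      simp only [mapOuter]
      exact (mapval_insert mapInner d q.2.1 _).symm
    rw [hstep, ih]

-- every value built by phase 1 has duplicate-free keys
theorem phase1_values_nodup (xs : List (Int × Int × Int × Int)) (d : PySem.Dict Int (PySem.Dict Int (List Int)))
    (h : ∀ p ∈ d.items, p.2.keys.Nodup) :
    ∀ p ∈ (xs.foldl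
        (fun d p =>
          d.insert p.2.1 ((d.getD p.2.1 PySem.Dict.empty).insert p.2.2.1
            (((d.getD p.2.1 PySem.Dict.empty).getD p.2.2.1 []) ++ [p.2.2.2])))
        d).items, p.2.keys.Nodup := by
  induction xs generalizing d with
  | nil => exact h
  | cons q xs ih =>
    simp only [List.foldl_cons]
    apply ih
    intro p hp
    rcases (PySem.Dict.mem_items_insert _ _ _ _).mp hp with h1 | ⟨h2, _⟩
    · have hin : (d.getD q.2.1 PySem.Dict.empty).keys.Nodup := by
        rw [PySem.Dict.getD_eq_get?_getD]
        cases hg : d.get? q.2.1 with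
        | none => simp [PySem.Dict.keys, PySem.Dict.empty]
        | some v => exact h _ (PySem.Dict.mem_items_of_get?_eq_some _ hg)
      rw [h1]
      exact PySem.Dict.nodup_keys_insert _ _ _ hin
    · exact h p h2

-- re-inserting the present value changes nothing (duplicate-free keys)
theorem insert_getD_self {ν : Type} (d : PySem.Dict Int ν) (k : Int) (dflt : ν)
    (hc : d.contains k = true) (hnd : d.keys.Nodup) :
    d.insert k (d.getD k dflt) = d := by
  apply PySem.Dict.ext
  rw [PySem.Dict.items_insert_of_contains _ _ hc]
  have hall : ∀ p ∈ d.items, (if (p.1 == k) = true then (k, d.getD k dflt) else p) = p := by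
    intro p hp
    by_cases hpk : p.1 = k
    · have hgd : d.getD p.1 dflt = p.2 :=
        PySem.Dict.getD_of_mem_items d (by simpa using hp) hnd dflt
      simp only [hpk, beq_self_eq_true, if_true]
      rw [← hpk, hgd]
    · simp [hpk]
  rw [List.map_congr_left hall]
  simp

-- the inner key loop of phase 2, collapsed to a single insert at r
theorem inner_collapse (r : Int) (os : List Int) (acc : PySem.Dict Int (PySem.Dict Int (List Int)))
    (hc : acc.contains r = true) (hnd : acc.keys.Nodup) :
    os.foldl
      (fun d2 o =>
        d2.modify r PySem.Dict.empty
          (fun inner => inner.modify o [] (fun l => PySem.List.sorted l (fun x => x) false)))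
      acc
    = acc.insert r
        (os.foldl (fun inner o => inner.modify o [] (fun l => PySem.List.sorted l (fun x => x) false))
          (acc.getD r PySem.Dict.empty)) := by
  induction os generalizing acc with
  | nil =>
    simp only [List.foldl_nil]
    exact (insert_getD_self acc r PySem.Dict.empty hc hnd).symm
  | cons o os ih =>
    simp only [List.foldl_cons]
    have hmod : acc.modify r PySem.Dict.empty
          (fun inner => inner.modify o [] (fun l => PySem.List.sorted l (fun x => x) false))
        = acc.insert r ((acc.getD r PySem.Dict.empty).modify o []
            (fun l => PySem.List.sorted l (fun x => x) false)) := rfl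
    rw [hmod, ih _ (PySem.Dict.contains_insert_self _ _ _)
        (PySem.Dict.nodup_keys_insert _ _ _ hnd),
      PySem.Dict.getD_insert_self, PySem.Dict.insert_insert_self]

-- folding the sort-modify over all keys of an inner dict sorts every value
theorem foldInner_eq (os : List Int) (inn : PySem.Dict Int (List Int))
    (hnd : inn.keys.Nodup) (hos : os.Nodup) (hmem : ∀ o ∈ os, inn.contains o = true) :
    os.foldl (fun inner o => inner.modify o [] (fun l => PySem.List.sorted l (fun x => x) false)) inn
    = PySem.Dict.mk (inn.items.map
        (fun p => if p.1 ∈ os then (p.1, PySem.List.sorted p.2 (fun x => x) false) else p)) := by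
  induction os generalizing inn with
  | nil =>
    apply PySem.Dict.ext
    simp
  | cons k os ih =>
    have hck : inn.contains k = true := hmem k List.mem_cons_self
    have hknotos : k ∉ os := (List.nodup_cons.mp hos).1
    simp only [List.foldl_cons]
    have hmod : inn.modify k [] (fun l => PySem.List.sorted l (fun x => x) false)
        = inn.insert k (PySem.List.sorted (inn.getD k []) (fun x => x) false) := rfl
    rw [hmod, ih (inn.insert k (PySem.List.sorted (inn.getD k []) (fun x => x) false))
        (PySem.Dict.nodup_keys_insert _ _ _ hnd) (List.nodup_cons.mp hos).2
        (by
          intro o ho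
          rw [PySem.Dict.contains_insert]
          simp [hmem o (List.mem_cons_of_mem _ ho)])]
    apply PySem.Dict.ext
    rw [PySem.Dict.items_insert_of_contains _ _ hck]
    simp only [List.map_map]
    apply List.map_congr_left
    intro p hp
    by_cases hpk : p.1 = k
    · have hgd : inn.getD p.1 [] = p.2 :=
        PySem.Dict.getD_of_mem_items inn (by simpa using hp) hnd []
      simp [hpk, hknotos, ← hgd]
    · simp [hpk, List.mem_cons]

-- phase 2 of A sorts every bucket of every processed key
theorem phase2_eq (ks : List Int) (acc : PySem.Dict Int (PySem.Dict Int (List Int)))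
    (hnd : acc.keys.Nodup) (hks : ks.Nodup) (hmem : ∀ k ∈ ks, acc.contains k = true)
    (hvals : ∀ p ∈ acc.items, p.2.keys.Nodup) :
    ks.foldl
      (fun d r =>
        ((d.getD r PySem.Dict.empty).keys).foldl
          (fun d2 o =>
            d2.modify r PySem.Dict.empty
              (fun inner => inner.modify o [] (fun l => PySem.List.sorted l (fun x => x) false)))
          d)
      acc
    = PySem.Dict.mk (acc.items.map (fun p => if p.1 ∈ ks then (p.1, mapInner p.2) else p)) := by
  induction ks generalizing acc with
  | nil =>
    apply PySem.Dict.ext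
    simp
  | cons k ks ih =>
    have hck : acc.contains k = true := hmem k List.mem_cons_self
    have hknotks : k ∉ ks := (List.nodup_cons.mp hks).1
    have hinn : (acc.getD k PySem.Dict.empty).keys.Nodup := by
      rw [PySem.Dict.getD_eq_get?_getD]
      cases hg : acc.get? k with
      | none => simp [PySem.Dict.keys, PySem.Dict.empty]
      | some v => exact hvals _ (PySem.Dict.mem_items_of_get?_eq_some _ hg)
    simp only [List.foldl_cons]
    rw [inner_collapse k _ acc hck hnd]
    rw [foldInner_eq _ _ hinn hinn (fun o ho => (PySem.Dict.contains_iff_mem_keys _ _).mpr ho)]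
    have hmapinner :
        PySem.Dict.mk ((acc.getD k PySem.Dict.empty).items.map
          (fun p => if p.1 ∈ (acc.getD k PySem.Dict.empty).keys
            then (p.1, PySem.List.sorted p.2 (fun x => x) false) else p))
        = mapInner (acc.getD k PySem.Dict.empty) := by
      simp only [mapInner]
      congr 1
      apply List.map_congr_left
      intro p hp
      have : p.1 ∈ (acc.getD k PySem.Dict.empty).keys := List.mem_map_of_mem hp
      simp [this]
    rw [hmapinner]
    rw [ih (acc.insert k (mapInner (acc.getD k PySem.Dict.empty)))
        (PySem.Dict.nodup_keys_insert _ _ _ hnd) (List.nodup_cons.mp hks).2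
        (by
          intro k' hk'
          rw [PySem.Dict.contains_insert]
          simp [hmem k' (List.mem_cons_of_mem _ hk')])
        (by
          intro p hp
          rcases (PySem.Dict.mem_items_insert _ _ _ _).mp hp with h1 | ⟨h2, _⟩
          · rw [h1]; simpa [keys_mapInner] using hinn
          · exact hvals p h2)]
    apply PySem.Dict.ext
    rw [PySem.Dict.items_insert_of_contains _ _ hck]
    simp only [List.map_map]
    apply List.map_congr_left
    intro p hp
    by_cases hpk : p.1 = k
    · have hgd : acc.getD p.1 PySem.Dict.empty = p.2 :=
        PySem.Dict.getD_of_mem_items acc (by simpa using hp) hnd PySem.Dict.empty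
      simp [hpk, hknotks, ← hgd]
    · simp [hpk, List.mem_cons]

-- ===== VERDICT (by name: the statement is the Claim_ definition above) =====
theorem build_ro_history_spec : Claim_equal_build_ro_history := by
  intro triples _
  show build_ro_history triples = build_ro_history_alt triples
  simp only [build_ro_history, build_ro_history_alt]
  have hB := phase1_inv triples PySem.Dict.empty
  rw [show mapOuter PySem.Dict.empty = PySem.Dict.empty from rfl] at hB
  rw [hB]
  have hnd : (triples.foldl
      (fun d p =>
        d.insert p.2.1 ((d.getD p.2.1 PySem.Dict.empty).insert p.2.2.1
          (((d.getD p.2.1 PySem.Dict.empty).getD p.2.2.1 []) ++ [p.2.2.2])))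
      PySem.Dict.empty).keys.Nodup := by
    exact PySem.Dict.nodup_keys_foldl_insert_key triples (fun p => p.2.1)
      (fun d p => (d.getD p.2.1 PySem.Dict.empty).insert p.2.2.1
        (((d.getD p.2.1 PySem.Dict.empty).getD p.2.2.1 []) ++ [p.2.2.2]))
      PySem.Dict.empty (by simp [PySem.Dict.keys, PySem.Dict.empty])
  have hvals := phase1_values_nodup triples PySem.Dict.empty (by simp [PySem.Dict.empty])
  rw [phase2_eq _ _ hnd hnd
    (fun k hk => (PySem.Dict.contains_iff_mem_keys _ _).mpr hk) hvals]
  simp only [mapOuter, List.map_map]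
  apply List.map_congr_left
  intro p hp
  have hk : p.1 ∈ (triples.foldl
      (fun d p =>
        d.insert p.2.1 ((d.getD p.2.1 PySem.Dict.empty).insert p.2.2.1
          (((d.getD p.2.1 PySem.Dict.empty).getD p.2.2.1 []) ++ [p.2.2.2])))
      PySem.Dict.empty).keys := List.mem_map_of_mem hp
  simp [hk]
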